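-- pv_equiv track=rewrite | github.com/glideinWMS/glideinwms | lib/condorLogParser.py | listStatuses
-- ===== SOURCE A (Python) =====
-- def listStatuses(jobs):
--     """Given a dictionary of job statuses (like the one got from `parseSubmitLogFastRaw`),
--     returns a dictionary of jobs in each status.
--
--     Args:
--         jobs (dict): Dictionary of job statuses.
--
--     Returns:
--         dict: Dictionary of jobs in each status category.
--               For example, {'009': ["1.003","2.001"], '012': ["418.001"], '005': ["1503.001","1555.002"]}
--     """
--     status = {}
--     for k, e in jobs.items():
--         try:
--             status[e].append(k)
--         except KeyError:
--             # there are only few possible values, using exceptions is faster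
--             status[e] = [k]
--     return status
-- ===== SOURCE B (Python) =====
-- def listStatuses(jobs):
--     order = list(dict.fromkeys(jobs.values()))
--     return {e: [k for k, s in jobs.items() if s == e] for e in order}
-- ===== Notes on version B (the rewrite author's own statement) =====
-- stated objective: alternative
-- what changed: Instead of one pass that grows per-status lists inside a dict with try/except, B first computes the distinct statuses in first-occurrence order (dict.fromkeys) and then builds each group by a comprehension filtering the items, via a dict comprehension.
import Mathlib
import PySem

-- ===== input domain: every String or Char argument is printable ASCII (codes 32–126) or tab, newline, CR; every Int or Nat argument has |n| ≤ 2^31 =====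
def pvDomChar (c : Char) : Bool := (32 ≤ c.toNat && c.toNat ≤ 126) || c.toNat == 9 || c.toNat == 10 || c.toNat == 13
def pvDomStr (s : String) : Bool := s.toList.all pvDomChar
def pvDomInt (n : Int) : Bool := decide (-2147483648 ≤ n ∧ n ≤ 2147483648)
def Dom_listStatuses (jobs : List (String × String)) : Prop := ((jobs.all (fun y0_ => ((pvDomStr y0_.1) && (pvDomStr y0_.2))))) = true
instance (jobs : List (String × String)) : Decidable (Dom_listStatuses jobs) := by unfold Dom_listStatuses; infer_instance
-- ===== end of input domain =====

-- B groups keys by status via distinct statuses (first occurrence) + per-status filtering, instead of A's one-pass dict-of-lists with try/except; objective: alternative decomposition, same results.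


-- ===== PORT A =====
-- one pass over jobs.items(): status[e].append(k) on KeyError status[e] = [k]; the try/except is the get? match
def listStatuses (jobs : List (String × String)) : List (String × List String) :=
  (jobs.foldl (fun status p =>
      match status.get? p.2 with
      | some l => status.insert p.2 (l ++ [p.1])
      | none   => status.insert p.2 [p.1])
    PySem.Dict.empty).items

-- ===== PORT B =====
-- order = list(dict.fromkeys(jobs.values())); {e: [k for k, s in jobs.items() if s == e] for e in order}
def listStatuses_alt (jobs : List (String × String)) : List (String × List String) :=
  let order := PySem.List.dedup (jobs.map Prod.snd)
  (order.foldl (fun d e =>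
      d.insert e ((jobs.filter (fun p => p.2 == e)).map Prod.fst))
    PySem.Dict.empty).items

-- ===== PRECONDITION & SPEC =====
def Spec_listStatuses (jobs : List (String × String)) (out : List (String × List String)) : Prop := out = listStatuses_alt jobs
instance (jobs : List (String × String)) (out : List (String × List String)) : Decidable (Spec_listStatuses jobs out) := by unfold Spec_listStatuses; infer_instance

-- ===== CLAIM (what is proved, stated in full; the proofs are below) =====
def Claim_equal_listStatuses : Prop := ∀ (jobs : List (String × String)), Dom_listStatuses jobs → Spec_listStatuses jobs (listStatuses jobs)

-- ===== LEMMAS AND PROOFS =====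

-- A's try/except step is exactly dict.modify with default []
theorem step_eq_modify (d : PySem.Dict String (List String)) (p : String × String) :
    (match d.get? p.2 with
     | some l => d.insert p.2 (l ++ [p.1])
     | none   => d.insert p.2 [p.1]) = d.modify p.2 [] (· ++ [p.1]) := by
  cases h : d.get? p.2 <;> simp [PySem.Dict.modify, PySem.Dict.getD_eq_get?_getD, h]

theorem foldA_eq_modify (jobs : List (String × String)) :
    jobs.foldl (fun status p =>
      match status.get? p.2 with
      | some l => status.insert p.2 (l ++ [p.1])
      | none   => status.insert p.2 [p.1]) PySem.Dict.empty
    = jobs.foldl (fun d p => d.modify p.2 [] (· ++ [p.1])) PySem.Dict.empty := by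
  congr 1; funext d p; exact step_eq_modify d p

-- the value A's dict holds at any status c is the filtered keys, in order
theorem foldA_getD (jobs : List (String × String)) (c : String) :
    (jobs.foldl (fun d p => d.modify p.2 [] (· ++ [p.1])) PySem.Dict.empty).getD c []
    = (jobs.filter (fun p => p.2 == c)).map Prod.fst := by
  have hswap : jobs.foldl (fun d p => d.modify p.2 [] (· ++ [p.1])) PySem.Dict.empty
      = (jobs.map Prod.swap).foldl (fun d q => d.modify q.1 [] (· ++ [q.2])) PySem.Dict.empty := by
    simp [List.foldl_map]
  rw [hswap, PySem.Dict.getD_foldl_modify_append]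
  simp [List.filter_map, List.map_map, Function.comp_def]

-- both ports equal the same canonical grouping
theorem A_eq_group (jobs : List (String × String)) :
    listStatuses jobs =
      (PySem.List.dedup (jobs.map Prod.snd)).map
        (fun e => (e, (jobs.filter (fun p => p.2 == e)).map Prod.fst)) := by
  unfold listStatuses
  rw [foldA_eq_modify]
  have hnd : (jobs.foldl (fun d p => d.modify p.2 [] (· ++ [p.1])) PySem.Dict.empty).keys.Nodup :=
    PySem.Dict.nodup_keys_foldl_modify_key jobs Prod.snd [] (fun d p => (· ++ [p.1])) _
      PySem.Dict.nodup_keys_empty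
  rw [PySem.Dict.items_eq_map_keys _ hnd []]
  have hkeys : (jobs.foldl (fun d p => d.modify p.2 [] (· ++ [p.1])) PySem.Dict.empty).keys
      = PySem.List.dedup (jobs.map Prod.snd) := by
    rw [PySem.Dict.keys_foldl_modify_key]
    simp [PySem.Dict.keys_empty, PySem.Set.update_nil_left]
  rw [hkeys]
  exact List.map_congr_left (fun e _ => by rw [foldA_getD jobs e])

theorem B_eq_group (jobs : List (String × String)) :
    listStatuses_alt jobs =
      (PySem.List.dedup (jobs.map Prod.snd)).map
        (fun e => (e, (jobs.filter (fun p => p.2 == e)).map Prod.fst)) := by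
  unfold listStatuses_alt
  show ((PySem.List.dedup (jobs.map Prod.snd)).foldl (fun d e =>
      d.insert e ((jobs.filter (fun p => p.2 == e)).map Prod.fst)) PySem.Dict.empty).items = _
  rw [PySem.Dict.items_foldl_insert_fresh _ (fun e => e)
        (fun e => (jobs.filter (fun p => p.2 == e)).map Prod.fst) PySem.Dict.empty
        (fun e _ => PySem.Dict.contains_empty _) (by simp)]
  simp [PySem.Dict.empty]

-- ===== VERDICT (by name: the statement is the Claim_ definition above) =====
theorem listStatuses_spec : Claim_equal_listStatuses := by
  intro jobs _
  unfold Spec_listStatuses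
  rw [A_eq_group, B_eq_group]
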